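-- pv_equiv track=rewrite | github.com/nubshulx/velora-sync | src/document_readers/word_reader.py | _is_requirement_header
-- ===== SOURCE A (Python) =====
-- def _is_requirement_header(line: str) -> bool:
--     """Check if line is a requirement header"""
--     line_lower = line.lower()
--
--     # Common requirement header patterns
--     patterns = [
--         'req-', 'req_', 'requirement',
--         'fr-', 'fr_', 'functional requirement',
--         'nfr-', 'nfr_', 'non-functional requirement',
--         'user story', 'us-', 'us_'
--     ]
--
--     return any(pattern in line_lower for pattern in patterns)
-- ===== SOURCE B (Python) =====
-- def _is_requirement_header(line: str) -> bool:
--     """Check if line is a requirement header (single left-to-right position scan)."""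
--     s = line.lower()
--     patterns = (
--         'req-', 'req_', 'requirement',
--         'fr-', 'fr_', 'functional requirement',
--         'nfr-', 'nfr_', 'non-functional requirement',
--         'user story', 'us-', 'us_'
--     )
--     return any(s.startswith(p, i) for i in range(len(s)) for p in patterns)
-- ===== Notes on version B (the rewrite author's own statement) =====
-- stated objective: alternative
-- what changed: A checks each of twelve patterns with an independent whole-line substring search; B makes a single left-to-right scan over the positions of the lowercased line and tests at each offset whether any pattern starts there, so no per-pattern substring search remains.
import Mathlib
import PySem

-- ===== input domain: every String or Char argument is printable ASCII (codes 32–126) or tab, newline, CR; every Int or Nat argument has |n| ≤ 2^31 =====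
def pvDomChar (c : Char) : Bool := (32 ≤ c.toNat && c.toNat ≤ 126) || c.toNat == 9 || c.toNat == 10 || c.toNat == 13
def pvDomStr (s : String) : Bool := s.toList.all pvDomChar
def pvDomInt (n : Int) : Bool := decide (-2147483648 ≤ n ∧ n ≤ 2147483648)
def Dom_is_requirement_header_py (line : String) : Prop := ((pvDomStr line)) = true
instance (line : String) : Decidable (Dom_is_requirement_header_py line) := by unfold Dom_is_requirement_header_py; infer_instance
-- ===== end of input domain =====

-- B replaces A's twelve whole-line substring searches with one left-to-right scan
-- over the positions of the lowercased line, testing each pattern at each offset (objective: alternative).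

def pvPatterns : List String :=
  ["req-", "req_", "requirement",
   "fr-", "fr_", "functional requirement",
   "nfr-", "nfr_", "non-functional requirement",
   "user story", "us-", "us_"]

-- ===== PORT A =====
-- any(pattern in line_lower for pattern in patterns)
def is_requirement_header_py (line : String) : Bool :=
  let line_lower := PySem.Str.lower line
  pvPatterns.any (fun pattern => PySem.Str.isIn pattern line_lower)

-- ===== PORT B =====
-- any(s.startswith(p, i) for i in range(len(s)) for p in patterns)
-- s.startswith(p, i) for 0 ≤ i ≤ len(s) is exactly: p is a prefix of s[i:]
def is_requirement_header_py_alt (line : String) : Bool :=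
  let s := PySem.Str.lower line
  (List.range s.toList.length).any (fun i =>
    pvPatterns.any (fun p => PySem.Chars.startswith (s.toList.drop i) p.toList))

-- ===== PRECONDITION & SPEC =====
def Spec_is_requirement_header_py (line : String) (out : Bool) : Prop := out = is_requirement_header_py_alt line
instance (line : String) (out : Bool) : Decidable (Spec_is_requirement_header_py line out) := by unfold Spec_is_requirement_header_py; infer_instance

-- ===== CLAIM (what is proved, stated in full; the proofs are below) =====
def Claim_equal_is_requirement_header_py : Prop := ∀ (line : String), Dom_is_requirement_header_py line → Spec_is_requirement_header_py line (is_requirement_header_py line)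

-- ===== LEMMAS AND PROOFS =====

-- For a nonempty pattern, 'sub in s' equals 'some position i < len s has sub as a prefix of s.drop i'.
theorem pv_isIn_eq_posScan (sub s : List Char) (hsub : sub ≠ []) :
    PySem.Chars.isIn sub s = (List.range s.length).any (fun i => PySem.Chars.startswith (s.drop i) sub) := by
  by_cases h : PySem.Chars.isIn sub s = true
  · rw [h]
    obtain ⟨j, hj⟩ := (PySem.Chars.exists_prefix_drop_iff_isIn sub s).mpr h
    have hjlt : j < s.length := by
      by_contra hge
      rw [List.drop_eq_nil_of_le (le_of_not_gt hge)] at hj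
      exact hsub (List.prefix_nil.mp hj)
    symm
    rw [List.any_eq_true]
    exact ⟨j, List.mem_range.mpr hjlt, (PySem.Chars.startswith_iff _ _).mpr hj⟩
  · rw [Bool.not_eq_true] at h
    rw [h]
    symm
    rw [Bool.eq_false_iff, Ne, List.any_eq_true]
    rintro ⟨i, _, hi⟩
    exact absurd ((PySem.Chars.exists_prefix_drop_iff_isIn sub s).mp
      ⟨i, (PySem.Chars.startswith_iff _ _).mp hi⟩) (by simp [h])

theorem pv_any_congr {α : Type} (l : List α) (f g : α → Bool) (h : ∀ a ∈ l, f a = g a) :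
    l.any f = l.any g := by
  induction l with
  | nil => rfl
  | cons a t ih => simp_all [List.any_cons]

-- swapping the two nested 'any's
theorem pv_any_swap {α β : Type} (l1 : List α) (l2 : List β) (f : α → β → Bool) :
    l1.any (fun a => l2.any (fun b => f a b)) = l2.any (fun b => l1.any (fun a => f a b)) := by
  rw [Bool.eq_iff_iff]
  simp only [List.any_eq_true]
  exact ⟨fun ⟨a, ha, b, hb, h⟩ => ⟨b, hb, a, ha, h⟩, fun ⟨b, hb, a, ha, h⟩ => ⟨a, ha, b, hb, h⟩⟩

-- ===== VERDICT (by name: the statement is the Claim_ definition above) =====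
theorem is_requirement_header_py_spec : Claim_equal_is_requirement_header_py := by
  intro line _
  unfold Spec_is_requirement_header_py is_requirement_header_py is_requirement_header_py_alt
  simp only [PySem.Str.isIn_eq]
  rw [pv_any_swap]
  exact pv_any_congr _ _ _ (fun p hp => pv_isIn_eq_posScan p.toList _ (by fin_cases hp <;> decide))
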